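-- pv_equiv track=rewrite | github.com/mmith9/LeetCode | 10 Regular Expression Matching.py | fix_p
-- ===== SOURCE A (Python) =====
-- def fix_p(p):
--     new_p = ''
--     last_catch = ''
--     while p:
--         if len(p)>1 and p[1] == '*':
--             catch = p[:2]
--             if (last_catch and catch == '.*') or last_catch == catch:
--                 pass
--             else:
--                 new_p += last_catch
--             last_catch = catch
--             p=p[2:]
--
--         else:
--             new_p += last_catch
--             last_catch = ''
--             new_p += p[0]
--             p = p[1:]
--     new_p += last_catch
--     return new_p
-- ===== SOURCE B (Python) =====
-- def fix_p(p):
--     # tokenize greedily: 2-char star tokens, else single chars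
--     toks = []
--     i = 0
--     while i < len(p):
--         if i + 1 < len(p) and p[i + 1] == '*':
--             toks.append(p[i:i + 2])
--             i += 2
--         else:
--             toks.append(p[i])
--             i += 1
--     # keep each token unless it is a star token followed by an equal star token or '.*'
--     out = []
--     for j, t in enumerate(toks):
--         if len(t) == 2 and j + 1 < len(toks):
--             nxt = toks[j + 1]
--             if len(nxt) == 2 and (nxt == '.*' or nxt == t):
--                 continue
--         out.append(t)
--     return ''.join(out)
-- ===== Notes on version B (the rewrite author's own statement) =====
-- stated objective: faster
-- what changed: Replaces A's single buffered pass with deferred emission and repeated string slicing/concatenation by two linear passes: an explicit greedy tokenizer producing a token list, then a forward-lookahead filter that drops a star token whenever the next token is an equal star token or the wildcard-star token, joined once at the end.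
import Mathlib
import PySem

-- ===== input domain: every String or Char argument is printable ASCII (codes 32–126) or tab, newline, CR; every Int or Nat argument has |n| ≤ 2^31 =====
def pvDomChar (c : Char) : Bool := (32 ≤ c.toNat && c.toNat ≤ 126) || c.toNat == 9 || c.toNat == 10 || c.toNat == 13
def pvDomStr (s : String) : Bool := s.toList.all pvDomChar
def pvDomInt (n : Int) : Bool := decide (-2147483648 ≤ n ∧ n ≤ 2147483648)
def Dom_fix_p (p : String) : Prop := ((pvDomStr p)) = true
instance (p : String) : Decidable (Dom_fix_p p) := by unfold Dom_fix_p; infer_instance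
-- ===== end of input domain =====

-- B replaces A's buffered single pass with tokenize-then-lookahead-filter (alternative decomposition, same result).

-- ===== PORT A =====
-- A's while loop over the shrinking string p, with accumulators new_p and last_catch (as char lists).
def fixpLoopA : List Char → List Char → List Char → List Char
  | [], newp, last => newp ++ last
  | [c], newp, last => newp ++ last ++ [c]      -- final iteration of the non-star branch, then exit
  | c :: s :: rest2, newp, last =>
    if s = '*' then
      -- catch = p[:2] is [c, '*']
      if (last ≠ [] ∧ [c, '*'] = ['.', '*']) ∨ last = [c, '*'] then
        fixpLoopA rest2 newp [c, '*']
      else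
        fixpLoopA rest2 (newp ++ last) [c, '*']
    else
      fixpLoopA (s :: rest2) (newp ++ last ++ [c]) []
termination_by l _ _ => l.length
decreasing_by all_goals (simp only [List.length_cons]; omega)

def fix_p (p : String) : String := String.ofList (fixpLoopA p.toList [] [])

-- ===== PORT B =====
-- greedy tokenizer: 2-char star tokens, else single chars
def fixpTokens : List Char → List (List Char)
  | [] => []
  | [c] => [[c]]
  | c :: s :: rest =>
    if s = '*' then [c, '*'] :: fixpTokens rest
    else [c] :: fixpTokens (s :: rest)

-- lookahead filter: drop a star token whose successor is an equal star token or '.*'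
def fixpKeep : List (List Char) → List (List Char)
  | [] => []
  | t :: ts =>
    match ts with
    | nxt :: _ =>
      if t.length = 2 ∧ nxt.length = 2 ∧ (nxt = ['.', '*'] ∨ nxt = t) then
        fixpKeep ts
      else
        t :: fixpKeep ts
    | [] => [t]

def fix_p_alt (p : String) : String :=
  String.ofList ((fixpKeep (fixpTokens p.toList)).flatten)

-- ===== PRECONDITION & SPEC =====
def Spec_fix_p (p : String) (out : String) : Prop := out = fix_p_alt p
instance (p : String) (out : String) : Decidable (Spec_fix_p p out) := by unfold Spec_fix_p; infer_instance

-- ===== CLAIM (what is proved, stated in full; the proofs are below) =====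
def Claim_equal_fix_p : Prop := ∀ (p : String), Dom_fix_p p → Spec_fix_p p (fix_p p)

-- ===== LEMMAS AND PROOFS =====

-- proof-only bridge: A's buffer semantics expressed over the token list
def fixpG : List Char → List (List Char) → List Char
  | last, [] => last
  | last, t :: ts =>
    if t.length = 2 then
      if (last ≠ [] ∧ t = ['.', '*']) ∨ last = t then fixpG t ts
      else last ++ fixpG t ts
    else last ++ t ++ fixpG [] ts

theorem fixpLoopA_eq_g (l : List Char) (newp last : List Char) :
    fixpLoopA l newp last = newp ++ fixpG last (fixpTokens l) := by
  fun_induction fixpLoopA l newp last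
  all_goals simp_all [fixpTokens, fixpG, List.append_assoc]

theorem fixpG_eq_keep (toks : List (List Char)) (last : List Char)
    (h : last = [] ∨ last.length = 2) :
    fixpG last toks =
      (fixpKeep (if last = [] then toks else last :: toks)).flatten := by
  induction toks generalizing last with
  | nil =>
    rcases h with h | h
    · simp [fixpG, fixpKeep, h]
    · have hlne : last ≠ [] := by intro h0; simp [h0] at h
      simp [fixpG, fixpKeep, hlne]
  | cons t ts ih =>
    by_cases hstar : t.length = 2
    · have htne : t ≠ [] := by intro h0; simp [h0] at hstar
      rcases h with hl | hl
      · subst hl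
        rw [if_pos rfl]
        simp only [fixpG, if_pos hstar]
        rw [if_neg (by simp [Ne, eq_comm, htne])]
        rw [ih t (Or.inr hstar), if_neg htne]
        simp
      · have hlne : last ≠ [] := by intro h0; simp [h0] at hl
        rw [if_neg hlne]
        simp only [fixpG, if_pos hstar]
        by_cases hc : (last ≠ [] ∧ t = ['.', '*']) ∨ last = t
        · rw [if_pos hc, ih t (Or.inr hstar), if_neg htne]
          have hk : fixpKeep (last :: t :: ts) = fixpKeep (t :: ts) := by
            simp only [fixpKeep]
            refine if_pos ⟨hl, hstar, ?_⟩
            rcases hc with ⟨_, h2⟩ | h2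
            · exact Or.inl h2
            · exact Or.inr h2.symm
          rw [hk]
        · rw [if_neg hc, ih t (Or.inr hstar), if_neg htne]
          have hk : fixpKeep (last :: t :: ts) = last :: fixpKeep (t :: ts) := by
            simp only [fixpKeep]
            refine if_neg ?_
            rintro ⟨_, _, h2 | h2⟩
            · exact hc (Or.inl ⟨hlne, h2⟩)
            · exact hc (Or.inr h2.symm)
          rw [hk]
          simp
    · have hkeep : ∀ ts', fixpKeep (t :: ts') = t :: fixpKeep ts' := by
        intro ts'
        cases ts' with
        | nil => simp [fixpKeep]
        | cons nxt r =>
          simp only [fixpKeep]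
          refine if_neg ?_
          rintro ⟨h2, _⟩
          exact hstar h2
      have h0 : fixpG [] ts = (fixpKeep ts).flatten := by
        simpa using ih [] (Or.inl rfl)
      rcases h with hl | hl
      · subst hl
        rw [if_pos rfl]
        simp only [fixpG, if_neg hstar]
        rw [h0, hkeep]
        simp
      · have hlne : last ≠ [] := by intro h0; simp [h0] at hl
        rw [if_neg hlne]
        simp only [fixpG, if_neg hstar]
        have hk2 : fixpKeep (last :: t :: ts) = last :: fixpKeep (t :: ts) := by
          simp only [fixpKeep]
          refine if_neg ?_
          rintro ⟨_, h2, _⟩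
          exact hstar h2
        rw [h0, hk2, hkeep]
        simp

-- ===== VERDICT (by name: the statement is the Claim_ definition above) =====
theorem fix_p_spec : Claim_equal_fix_p := by
  intro p _
  unfold Spec_fix_p fix_p fix_p_alt
  rw [fixpLoopA_eq_g, fixpG_eq_keep _ _ (Or.inl rfl)]
  simp
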